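-- pv_equiv track=rewrite | github.com/huangqi2002/CameraCalibration | utils/web_util_aes.py | min_columns
-- ===== SOURCE A (Python) =====
-- def min_columns(state, nb):
--     for i in range(4):
--         a = []
--         b = []
--         for j in range(nb):
--             a.append(state[j][i])
--             if state[j][i] & 0x80:
--                 b.append(state[j][i] << 1 ^ 0x011b)
--             else:
--                 b.append(state[j][i] << 1)
--         state[0][i] = b[0] ^ a[1] ^ b[1] ^ a[2] ^ a[3]
--         state[1][i] = a[0] ^ b[1] ^ a[2] ^ b[2] ^ a[3]
--         state[2][i] = a[0] ^ a[1] ^ b[2] ^ a[3] ^ b[3]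
--         state[3][i] = a[0] ^ b[0] ^ a[1] ^ a[2] ^ b[3]
--     return state
-- ===== SOURCE B (Python) =====
-- def min_columns(state, nb):
--     # In-place MixColumns: take each column across the nb rows, then mix its four
--     # bytes using a running XOR sum and xtime of adjacent differences.
--     def xtime(x):
--         return (x << 1) ^ 0x011b if x & 0x80 else x << 1
--
--     for i in range(4):
--         s0, s1, s2, s3 = [row[i] for row in state[:nb]][:4]
--         t = s0 ^ s1 ^ s2 ^ s3
--         state[0][i] = s0 ^ t ^ xtime(s0 ^ s1)
--         state[1][i] = s1 ^ t ^ xtime(s1 ^ s2)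
--         state[2][i] = s2 ^ t ^ xtime(s2 ^ s3)
--         state[3][i] = s3 ^ t ^ xtime(s3 ^ s0)
--     return state
-- ===== Notes on version B (the rewrite author's own statement) =====
-- stated objective: simpler
-- what changed: Instead of building parallel a (bytes) and b (xtime'd bytes) lists over all nb rows and XORing five entries of them per output byte, B reads each column once, unpacks its first four bytes, keeps their running XOR t, and uses the XOR-linearity of xtime to write each output as s_k ^ t ^ xtime(s_k ^ s_{k+1}); the b list and the per-row conditional doubling disappear.
import Mathlib
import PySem

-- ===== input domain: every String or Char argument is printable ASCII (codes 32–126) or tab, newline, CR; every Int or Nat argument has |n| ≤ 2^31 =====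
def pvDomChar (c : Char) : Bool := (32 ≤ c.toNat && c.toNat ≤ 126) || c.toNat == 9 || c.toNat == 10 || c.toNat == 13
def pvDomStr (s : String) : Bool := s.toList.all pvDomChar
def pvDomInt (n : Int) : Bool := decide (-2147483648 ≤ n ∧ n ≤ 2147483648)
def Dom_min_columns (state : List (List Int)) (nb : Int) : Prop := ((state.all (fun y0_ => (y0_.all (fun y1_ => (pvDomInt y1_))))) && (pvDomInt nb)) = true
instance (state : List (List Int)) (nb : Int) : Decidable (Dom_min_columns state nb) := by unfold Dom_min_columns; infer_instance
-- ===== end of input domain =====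

-- B computes MixColumns from the four column bytes directly (a running XOR sum plus xtime of
-- adjacent differences, using XOR-linearity of xtime) instead of building per-column a/b lists
-- over all nb rows; both Pythons mutate `state` in place in the same cells — the equivalence
-- proved here is about the return value.


-- ===== PORT A =====
-- the body of A's outer `for i in range(4)` loop (builds the a/b lists over j in range(nb))
def min_columns_step (nb : Int) (st : List (List Int)) (i : Int) : List (List Int) :=
  let ab :=
    (PySem.List.pyRange 0 nb 1).foldl
      (fun (s : List Int × List Int) j =>
        (s.1 ++ [PySem.List.pyGetD (PySem.List.pyGetD st j []) i 0],
         s.2 ++ [if PySem.Int.band (PySem.List.pyGetD (PySem.List.pyGetD st j []) i 0) 0x80 ≠ 0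
                 then PySem.Int.bxor ((PySem.List.pyGetD (PySem.List.pyGetD st j []) i 0) <<< (1 : Nat)) 0x011b
                 else (PySem.List.pyGetD (PySem.List.pyGetD st j []) i 0) <<< (1 : Nat)]))
      ([], [])
  let a := ab.1
  let b := ab.2
  let st := PySem.List.pySetD st 0 (PySem.List.pySetD (PySem.List.pyGetD st 0 []) i
    (PySem.Int.bxor (PySem.Int.bxor (PySem.Int.bxor (PySem.Int.bxor (PySem.List.pyGetD b 0 0) (PySem.List.pyGetD a 1 0)) (PySem.List.pyGetD b 1 0)) (PySem.List.pyGetD a 2 0)) (PySem.List.pyGetD a 3 0)))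
  let st := PySem.List.pySetD st 1 (PySem.List.pySetD (PySem.List.pyGetD st 1 []) i
    (PySem.Int.bxor (PySem.Int.bxor (PySem.Int.bxor (PySem.Int.bxor (PySem.List.pyGetD a 0 0) (PySem.List.pyGetD b 1 0)) (PySem.List.pyGetD a 2 0)) (PySem.List.pyGetD b 2 0)) (PySem.List.pyGetD a 3 0)))
  let st := PySem.List.pySetD st 2 (PySem.List.pySetD (PySem.List.pyGetD st 2 []) i
    (PySem.Int.bxor (PySem.Int.bxor (PySem.Int.bxor (PySem.Int.bxor (PySem.List.pyGetD a 0 0) (PySem.List.pyGetD a 1 0)) (PySem.List.pyGetD b 2 0)) (PySem.List.pyGetD a 3 0)) (PySem.List.pyGetD b 3 0)))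
  let st := PySem.List.pySetD st 3 (PySem.List.pySetD (PySem.List.pyGetD st 3 []) i
    (PySem.Int.bxor (PySem.Int.bxor (PySem.Int.bxor (PySem.Int.bxor (PySem.List.pyGetD a 0 0) (PySem.List.pyGetD b 0 0)) (PySem.List.pyGetD a 1 0)) (PySem.List.pyGetD a 2 0)) (PySem.List.pyGetD b 3 0)))
  st

def min_columns (state : List (List Int)) (nb : Int) : List (List Int) :=
  (PySem.List.pyRange 0 4 1).foldl (min_columns_step nb) state

-- ===== PORT B =====
def pyXtime (x : Int) : Int :=
  if PySem.Int.band x 0x80 ≠ 0 then PySem.Int.bxor (x <<< (1 : Nat)) 0x011b else x <<< (1 : Nat)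

-- the body of B's `for i in range(4)` loop
def min_columns_alt_step (nb : Int) (st : List (List Int)) (i : Int) : List (List Int) :=
  let col := (PySem.List.slice st none (some nb)).map (fun row => PySem.List.pyGetD row i 0)
  let s0 := PySem.List.pyGetD (PySem.List.slice col none (some 4)) 0 0
  let s1 := PySem.List.pyGetD (PySem.List.slice col none (some 4)) 1 0
  let s2 := PySem.List.pyGetD (PySem.List.slice col none (some 4)) 2 0
  let s3 := PySem.List.pyGetD (PySem.List.slice col none (some 4)) 3 0
  let t := PySem.Int.bxor (PySem.Int.bxor (PySem.Int.bxor s0 s1) s2) s3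
  let st := PySem.List.pySetD st 0 (PySem.List.pySetD (PySem.List.pyGetD st 0 []) i
    (PySem.Int.bxor (PySem.Int.bxor s0 t) (pyXtime (PySem.Int.bxor s0 s1))))
  let st := PySem.List.pySetD st 1 (PySem.List.pySetD (PySem.List.pyGetD st 1 []) i
    (PySem.Int.bxor (PySem.Int.bxor s1 t) (pyXtime (PySem.Int.bxor s1 s2))))
  let st := PySem.List.pySetD st 2 (PySem.List.pySetD (PySem.List.pyGetD st 2 []) i
    (PySem.Int.bxor (PySem.Int.bxor s2 t) (pyXtime (PySem.Int.bxor s2 s3))))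
  let st := PySem.List.pySetD st 3 (PySem.List.pySetD (PySem.List.pyGetD st 3 []) i
    (PySem.Int.bxor (PySem.Int.bxor s3 t) (pyXtime (PySem.Int.bxor s3 s0))))
  st

def min_columns_alt (state : List (List Int)) (nb : Int) : List (List Int) :=
  (PySem.List.pyRange 0 4 1).foldl (min_columns_alt_step nb) state

-- ===== PRECONDITION & SPEC =====
-- Pre_: exactly the inputs on which the Python A returns (no IndexError): nb >= 4,
-- at least nb rows, and each of the first nb rows (the scanned ones) has at least 4 entries.
def Pre_min_columns (state : List (List Int)) (nb : Int) : Prop :=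
  4 ≤ nb ∧ nb ≤ (state.length : Int) ∧ ∀ row ∈ state.take nb.toNat, 4 ≤ row.length
instance (state : List (List Int)) (nb : Int) : Decidable (Pre_min_columns state nb) := by
  unfold Pre_min_columns; infer_instance

def pvWitness_min_columns : List (List Int) × Int :=
  ([[1, 2, 3, 4], [5, 6, 7, 8], [9, 10, 11, 12], [130, 14, 15, 16]], 4)

def Spec_min_columns (state : List (List Int)) (nb : Int) (out : List (List Int)) : Prop := out = min_columns_alt state nb
instance (state : List (List Int)) (nb : Int) (out : List (List Int)) : Decidable (Spec_min_columns state nb out) := by unfold Spec_min_columns; infer_instance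

-- ===== CLAIM (what is proved, stated in full; the proofs are below) =====
def Claim_equal_min_columns : Prop := ∀ (state : List (List Int)) (nb : Int), Dom_min_columns state nb → Pre_min_columns state nb → Spec_min_columns state nb (min_columns state nb)

-- ===== LEMMAS AND PROOFS =====

-- two's-complement test bit, matching PySem's encoding of negative ints
def pvTB (x : Int) (i : Nat) : Bool :=
  if 0 ≤ x then x.toNat.testBit i else !((-x - 1).toNat.testBit i)

theorem pvTB_ext {x y : Int} (h : ∀ i, pvTB x i = pvTB y i) : x = y := by
  unfold pvTB at h
  by_cases hx : 0 ≤ x <;> by_cases hy : 0 ≤ y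
  · simp only [if_pos hx, if_pos hy] at h
    have := Nat.eq_of_testBit_eq h; omega
  · exfalso
    have hb := h (max x.toNat (-y-1).toNat)
    simp only [if_pos hx, if_neg hy] at hb
    rw [Nat.testBit_eq_false_of_lt (by
      calc x.toNat < 2 ^ x.toNat := Nat.lt_two_pow_self
      _ ≤ 2 ^ (max x.toNat (-y-1).toNat) := Nat.pow_le_pow_right (by norm_num) (le_max_left _ _)),
      Nat.testBit_eq_false_of_lt (by
      calc (-y-1).toNat < 2 ^ (-y-1).toNat := Nat.lt_two_pow_self
      _ ≤ 2 ^ (max x.toNat (-y-1).toNat) := Nat.pow_le_pow_right (by norm_num) (le_max_right _ _))] at hb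
    simp at hb
  · exfalso
    have hb := h (max y.toNat (-x-1).toNat)
    simp only [if_pos hy, if_neg hx] at hb
    rw [Nat.testBit_eq_false_of_lt (by
      calc (-x-1).toNat < 2 ^ (-x-1).toNat := Nat.lt_two_pow_self
      _ ≤ 2 ^ (max y.toNat (-x-1).toNat) := Nat.pow_le_pow_right (by norm_num) (le_max_right _ _)),
      Nat.testBit_eq_false_of_lt (by
      calc y.toNat < 2 ^ y.toNat := Nat.lt_two_pow_self
      _ ≤ 2 ^ (max y.toNat (-x-1).toNat) := Nat.pow_le_pow_right (by norm_num) (le_max_left _ _))] at hb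
    simp at hb
  · simp only [if_neg hx, if_neg hy, Bool.not_inj_iff] at h
    have := Nat.eq_of_testBit_eq h; omega

theorem pvTB_bxor (x y : Int) (i : Nat) :
    pvTB (PySem.Int.bxor x y) i = ((pvTB x i) != (pvTB y i)) := by
  unfold pvTB PySem.Int.bxor
  by_cases hx : 0 ≤ x <;> by_cases hy : 0 ≤ y <;>
    simp only [if_pos, if_neg, hx, hy, if_true, if_false]
  · rw [if_pos (by positivity)]
    simp [Nat.testBit_xor]
  · rw [if_neg (by omega)]
    have : (-(-((x.toNat ^^^ (-y - 1).toNat : Nat) : Int) - 1) - 1).toNat = x.toNat ^^^ (-y - 1).toNat := by omega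
    rw [this]
    simp [Nat.testBit_xor]
  · rw [if_neg (by omega)]
    have : (-(-(((-x - 1).toNat ^^^ y.toNat : Nat) : Int) - 1) - 1).toNat = (-x - 1).toNat ^^^ y.toNat := by omega
    rw [this]
    simp [Nat.testBit_xor, Bool.xor_comm]
  · rw [if_pos (by positivity)]
    have : ((((-x - 1).toNat ^^^ (-y - 1).toNat : Nat) : Int)).toNat = (-x - 1).toNat ^^^ (-y - 1).toNat := by omega
    rw [this]
    simp [Nat.testBit_xor]

theorem bxor_assoc (x y z : Int) :
    PySem.Int.bxor (PySem.Int.bxor x y) z = PySem.Int.bxor x (PySem.Int.bxor y z) := by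
  apply pvTB_ext; intro i; simp [pvTB_bxor, Bool.xor_assoc]

theorem bxor_left_comm (x y z : Int) :
    PySem.Int.bxor x (PySem.Int.bxor y z) = PySem.Int.bxor y (PySem.Int.bxor x z) := by
  apply pvTB_ext; intro i; simp only [pvTB_bxor]
  cases pvTB x i <;> cases pvTB y i <;> cases pvTB z i <;> rfl

theorem bxor_cancel_left (x y : Int) : PySem.Int.bxor x (PySem.Int.bxor x y) = y := by
  apply pvTB_ext; intro i; simp only [pvTB_bxor]
  cases pvTB x i <;> cases pvTB y i <;> rfl

theorem pvTB_double (x : Int) (i : Nat) :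
    pvTB (x * 2) i = if i = 0 then false else pvTB x (i - 1) := by
  unfold pvTB
  by_cases hx : 0 ≤ x
  · rw [if_pos (by omega), if_pos hx]
    have h2 : (x * 2).toNat = x.toNat * 2 := by omega
    rw [h2]
    cases i with
    | zero => simp [Nat.testBit_zero, Nat.mul_mod_left]
    | succ n => simp [Nat.testBit_add_one, Nat.mul_div_cancel]
  · rw [if_neg (by omega), if_neg hx]
    have h2 : (-(x * 2) - 1).toNat = (-x - 1).toNat * 2 + 1 := by omega
    rw [h2]
    cases i with
    | zero => simp [Nat.testBit_zero, Nat.mul_add_mod]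
    | succ n =>
        have : ((-x - 1).toNat * 2 + 1) / 2 = (-x - 1).toNat := by omega
        simp only [Nat.testBit_add_one, this]
        simp

theorem bxor_shiftLeft (x y : Int) :
    (PySem.Int.bxor x y) <<< (1 : Nat) = PySem.Int.bxor (x <<< (1 : Nat)) (y <<< (1 : Nat)) := by
  simp only [Int.shiftLeft_eq, pow_one]
  apply pvTB_ext; intro i
  simp only [pvTB_double, pvTB_bxor]
  cases hd : decide (i = 0) <;> cases pvTB x (i - 1) <;> cases pvTB y (i - 1) <;> simp

theorem testBit_128 (j : Nat) : Nat.testBit 128 j = decide (j = 7) := by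
  rcases Nat.lt_or_ge j 8 with hj | hj
  · interval_cases j <;> decide
  · rw [Nat.testBit_eq_false_of_lt (by calc (128:Nat) < 2 ^ 8 := by norm_num
      _ ≤ 2 ^ j := Nat.pow_le_pow_right (by norm_num) hj)]
    simp; omega

theorem nat_and_two_pow7 (m : Nat) : m &&& 128 = if m.testBit 7 then 128 else 0 := by
  by_cases h : m.testBit 7 <;>
  · apply Nat.eq_of_testBit_eq; intro j
    by_cases hj : j = 7 <;> simp [Nat.testBit_and, hj, h, testBit_128]

theorem band128_eq (x : Int) : PySem.Int.band x 128 = if pvTB x 7 then 128 else 0 := by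
  unfold PySem.Int.band pvTB
  by_cases hx : 0 ≤ x
  · rw [if_pos hx, if_pos hx, if_pos (by norm_num : (0:Int) ≤ 128)]
    have h128 : (128 : Int).toNat = 128 := rfl
    rw [h128, nat_and_two_pow7]
    by_cases h : x.toNat.testBit 7 <;> simp [h]
  · rw [if_neg hx, if_neg hx, if_pos (by norm_num : (0:Int) ≤ 128)]
    have h128 : (128 : Int).toNat = 128 := rfl
    rw [h128, Nat.and_comm, nat_and_two_pow7]
    cases h : (-x - 1).toNat.testBit 7 <;> norm_num

theorem bxor_zero_left (y : Int) : PySem.Int.bxor 0 y = y := by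
  rw [PySem.Int.bxor_comm]; exact PySem.Int.bxor_zero y

theorem pyXtime_eq (x : Int) :
    pyXtime x = PySem.Int.bxor (x <<< (1 : Nat)) (if pvTB x 7 then 283 else 0) := by
  unfold pyXtime
  rw [show (0x80 : Int) = 128 from rfl, band128_eq]
  by_cases h : pvTB x 7 <;> simp [h]

theorem pyXtime_bxor (x y : Int) :
    pyXtime (PySem.Int.bxor x y) = PySem.Int.bxor (pyXtime x) (pyXtime y) := by
  rw [pyXtime_eq, pyXtime_eq, pyXtime_eq, bxor_shiftLeft]
  have htb : pvTB (PySem.Int.bxor x y) 7 = (pvTB x 7 != pvTB y 7) := pvTB_bxor x y 7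
  rw [htb]
  have h283 : PySem.Int.bxor 283 283 = 0 := by decide
  cases h1 : pvTB x 7 <;> cases h2 : pvTB y 7 <;>
    simp [bxor_assoc, bxor_left_comm, PySem.Int.bxor_comm, h283, PySem.Int.bxor_zero, bxor_zero_left, bxor_cancel_left]

theorem row0_eq (s0 s1 s2 s3 : Int) :
    PySem.Int.bxor (PySem.Int.bxor (PySem.Int.bxor (PySem.Int.bxor (pyXtime s0) s1) (pyXtime s1)) s2) s3 =
    PySem.Int.bxor (PySem.Int.bxor s0 (PySem.Int.bxor (PySem.Int.bxor (PySem.Int.bxor s0 s1) s2) s3)) (pyXtime (PySem.Int.bxor s0 s1)) := by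
  simp [pyXtime_bxor, bxor_assoc, bxor_left_comm, PySem.Int.bxor_comm, bxor_cancel_left, PySem.Int.bxor_self, PySem.Int.bxor_zero]

theorem row1_eq (s0 s1 s2 s3 : Int) :
    PySem.Int.bxor (PySem.Int.bxor (PySem.Int.bxor (PySem.Int.bxor s0 (pyXtime s1)) s2) (pyXtime s2)) s3 =
    PySem.Int.bxor (PySem.Int.bxor s1 (PySem.Int.bxor (PySem.Int.bxor (PySem.Int.bxor s0 s1) s2) s3)) (pyXtime (PySem.Int.bxor s1 s2)) := by
  simp [pyXtime_bxor, bxor_assoc, bxor_left_comm, PySem.Int.bxor_comm, bxor_cancel_left, PySem.Int.bxor_self, PySem.Int.bxor_zero]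

theorem row2_eq (s0 s1 s2 s3 : Int) :
    PySem.Int.bxor (PySem.Int.bxor (PySem.Int.bxor (PySem.Int.bxor s0 s1) (pyXtime s2)) s3) (pyXtime s3) =
    PySem.Int.bxor (PySem.Int.bxor s2 (PySem.Int.bxor (PySem.Int.bxor (PySem.Int.bxor s0 s1) s2) s3)) (pyXtime (PySem.Int.bxor s2 s3)) := by
  simp [pyXtime_bxor, bxor_assoc, bxor_left_comm, PySem.Int.bxor_comm, bxor_cancel_left, PySem.Int.bxor_self, PySem.Int.bxor_zero]

theorem row3_eq (s0 s1 s2 s3 : Int) :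
    PySem.Int.bxor (PySem.Int.bxor (PySem.Int.bxor (PySem.Int.bxor s0 (pyXtime s0)) s1) s2) (pyXtime s3) =
    PySem.Int.bxor (PySem.Int.bxor s3 (PySem.Int.bxor (PySem.Int.bxor (PySem.Int.bxor s0 s1) s2) s3)) (pyXtime (PySem.Int.bxor s3 s0)) := by
  simp [pyXtime_bxor, bxor_assoc, bxor_left_comm, PySem.Int.bxor_comm, bxor_cancel_left, PySem.Int.bxor_self, PySem.Int.bxor_zero]

-- the k-th entry of B's sliced column equals A's totalized state[k][i] read (any state, 4 ≤ nb)
theorem col_get (st : List (List Int)) (i nb k : Int) (h4 : 4 ≤ nb) (h0 : 0 ≤ k) (hk : k < 4) :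
    PySem.List.pyGetD (PySem.List.slice ((PySem.List.slice st none (some nb)).map
        (fun row => PySem.List.pyGetD row i 0)) none (some 4)) k 0
    = PySem.List.pyGetD (PySem.List.pyGetD st k []) i 0 := by
  have e1 : PySem.List.slice st none (some nb) = st.take nb.toNat :=
    PySem.List.slice_to _ (by omega)
  rw [e1]
  have e2 : PySem.List.slice ((st.take nb.toNat).map (fun row => PySem.List.pyGetD row i 0)) none (some 4)
      = ((st.take nb.toNat).map (fun row => PySem.List.pyGetD row i 0)).take (4 : Int).toNat :=
    PySem.List.slice_to _ (by norm_num)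
  rw [e2, show (4 : Int).toNat = 4 from rfl]
  rw [PySem.List.pyGetD_of_nonneg _ _ h0, PySem.List.pyGetD_of_nonneg _ _ h0]
  rcases Nat.lt_or_ge k.toNat st.length with h | h
  · have hn : k.toNat < nb.toNat := by omega
    have h4' : k.toNat < 4 := by omega
    simp [List.getD_eq_getElem?_getD, List.getElem?_take, List.getElem?_map, hn, h4', h]
  · have h1 : st.getD k.toNat [] = [] := List.getD_eq_default _ _ h
    rw [h1]
    have h2 : (((st.take nb.toNat).map (fun row => PySem.List.pyGetD row i 0)).take 4).getD k.toNat 0 = 0 := by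
      apply List.getD_eq_default
      simp
      omega
    rw [h2]
    simp [PySem.List.pyGetD, PySem.List.pyGet?, PySem.List.pyIdx?]

theorem step_eq (nb : Int) (h4 : 4 ≤ nb) (st : List (List Int)) (i : Int) :
    min_columns_step nb st i = min_columns_alt_step nb st i := by
  simp only [min_columns_step, min_columns_alt_step]
  rw [col_get st i nb 0 h4 (by norm_num) (by norm_num),
      col_get st i nb 1 h4 (by norm_num) (by norm_num),
      col_get st i nb 2 h4 (by norm_num) (by norm_num),
      col_get st i nb 3 h4 (by norm_num) (by norm_num)]
  rw [PySem.List.foldl_prod_mk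
      (f := fun (acc : List Int) (j : Int) => acc ++ [PySem.List.pyGetD (PySem.List.pyGetD st j []) i 0])
      (g := fun (acc : List Int) (j : Int) => acc ++ [if PySem.Int.band (PySem.List.pyGetD (PySem.List.pyGetD st j []) i 0) 0x80 ≠ 0 then PySem.Int.bxor ((PySem.List.pyGetD (PySem.List.pyGetD st j []) i 0) <<< (1 : Nat)) 0x011b else (PySem.List.pyGetD (PySem.List.pyGetD st j []) i 0) <<< (1 : Nat)])]
  simp only [PySem.List.foldl_append_singleton_eq_map, List.nil_append]
  simp only [show ∀ v : Int, (if PySem.Int.band v 0x80 ≠ 0 then PySem.Int.bxor (v <<< (1 : Nat)) 0x011b else v <<< (1 : Nat)) = pyXtime v from fun _ => rfl]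
  rw [PySem.List.pyGetD_map_pyRange_of_nonneg _ nb 0 0 (by norm_num) (by omega),
      PySem.List.pyGetD_map_pyRange_of_nonneg _ nb 1 0 (by norm_num) (by omega),
      PySem.List.pyGetD_map_pyRange_of_nonneg _ nb 2 0 (by norm_num) (by omega),
      PySem.List.pyGetD_map_pyRange_of_nonneg _ nb 3 0 (by norm_num) (by omega),
      PySem.List.pyGetD_map_pyRange_of_nonneg _ nb 0 0 (by norm_num) (by omega),
      PySem.List.pyGetD_map_pyRange_of_nonneg _ nb 1 0 (by norm_num) (by omega),
      PySem.List.pyGetD_map_pyRange_of_nonneg _ nb 2 0 (by norm_num) (by omega),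
      PySem.List.pyGetD_map_pyRange_of_nonneg _ nb 3 0 (by norm_num) (by omega)]
  rw [row0_eq, row1_eq, row2_eq, row3_eq]

-- ===== VERDICT (by name: the statement is the Claim_ definition above) =====
set_option maxHeartbeats 1000000 in
theorem min_columns_spec : Claim_equal_min_columns := by
  intro state nb _ hpre
  unfold Spec_min_columns
  have h4 : 4 ≤ nb := hpre.1
  unfold min_columns min_columns_alt
  have key : ∀ (l : List Int) (st : List (List Int)),
      l.foldl (min_columns_step nb) st = l.foldl (min_columns_alt_step nb) st := by
    intro l
    induction l with
    | nil => intro st; rfl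
    | cons a l ih => intro st; rw [List.foldl_cons, List.foldl_cons, step_eq nb h4, ih]
  exact key _ _
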